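-- pv_equiv track=rewrite | github.com/sumanth-naik/Striver-191 | Stacks/CandyCrush.py | removeDuplicatesGreaterOrEqualToK
-- ===== SOURCE A (Python) =====
-- from collections import deque
--
-- def removeDuplicatesGreaterOrEqualToK(s: str, k: int) -> str:
--     dq = deque()
--     for char in s:
--         if dq and dq[-1][0] !=char and dq[-1][1]>=k:
--             dq.pop()
--
--         if dq and dq[-1][0]==char:
--             top = dq.pop()
--             dq.append((top[0],top[1]+1))
--         else:
--             dq.append((char,1))
--
--     if dq[-1][1] >= k:
--         dq.pop()
--
--     return(''.join([q[0]*q[1] for q in dq]))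
-- ===== SOURCE B (Python) =====
-- def removeDuplicatesGreaterOrEqualToK(s: str, k: int) -> str:
--     # Repeatedly delete the leftmost maximal run of length >= k, rescanning
--     # (so newly adjacent equal runs merge), until no such run remains.
--     while True:
--         runs = []
--         for c in s:
--             if runs and runs[-1][0] == c:
--                 runs[-1] = (c, runs[-1][1] + 1)
--             else:
--                 runs.append((c, 1))
--         for i, (_, n) in enumerate(runs):
--             if n >= k:
--                 s = ''.join(ch * m for ch, m in runs[:i] + runs[i + 1:])
--                 break
--         else:
--             return s
-- ===== Notes on version B (the rewrite author's own statement) =====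
-- stated objective: alternative
-- what changed: A does one left-to-right pass with a deque of (char,count) pairs that cascades pops inline; B instead repeatedly run-length-encodes the whole string, deletes the leftmost run of length >= k, rejoins and rescans until no long run remains (a rewrite-to-normal-form formulation).
-- crash fix: On the empty string A raises IndexError (dq[-1] on an empty deque after the loop); B returns ''. — e.g. on removeDuplicatesGreaterOrEqualToK("", 3): A raises IndexError, B returns ""
import Mathlib
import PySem

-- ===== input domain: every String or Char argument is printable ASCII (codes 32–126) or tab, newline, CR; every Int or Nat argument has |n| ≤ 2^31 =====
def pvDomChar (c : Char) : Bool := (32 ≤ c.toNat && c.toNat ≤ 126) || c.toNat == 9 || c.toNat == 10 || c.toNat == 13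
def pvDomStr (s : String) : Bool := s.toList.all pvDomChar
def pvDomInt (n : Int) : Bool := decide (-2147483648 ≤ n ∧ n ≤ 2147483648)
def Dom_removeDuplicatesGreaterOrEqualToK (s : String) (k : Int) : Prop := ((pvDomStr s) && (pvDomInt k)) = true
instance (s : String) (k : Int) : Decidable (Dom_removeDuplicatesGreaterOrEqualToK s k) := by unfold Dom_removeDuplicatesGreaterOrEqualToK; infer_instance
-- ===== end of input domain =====

-- B re-implements A's one-pass cascading deque by repeated leftmost long-run removal on a
-- run-length encoding (alternative algorithm, not faster); return values proved equal on Pre_.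

-- ===== PORT A =====
-- the deque is kept with its RIGHT end (Python dq[-1]) at the HEAD of the list
def pvStepA (k : Int) (dq : List (Char × Int)) (c : Char) : List (Char × Int) :=
  let dq1 :=
    match dq with
    | (c0, n0) :: rest => if c0 ≠ c ∧ n0 ≥ k then rest else dq
    | [] => dq
  match dq1 with
  | (c0, n0) :: rest => if c0 = c then (c0, n0 + 1) :: rest else (c, 1) :: dq1
  | [] => [(c, 1)]

-- final 'if dq[-1][1] >= k: dq.pop()' and the join; on dq = [] Python raises (excluded by Pre_)
def pvFinish (k : Int) (dq : List (Char × Int)) : List Char :=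
  let dq2 :=
    match dq with
    | (c0, n0) :: rest => if n0 ≥ k then rest else (c0, n0) :: rest
    | [] => dq
  (dq2.reverse.map (fun q => List.replicate q.2.toNat q.1)).flatten

def removeDuplicatesGreaterOrEqualToK (s : String) (k : Int) : String :=
  String.ofList (pvFinish k (s.toList.foldl (pvStepA k) []))

-- ===== PORT B =====
-- run-length encoding, most recent run at the head of the accumulator (runs[-1])
def pvRunStep (rs : List (Char × Int)) (c : Char) : List (Char × Int) :=
  match rs with
  | (c0, n0) :: rest => if c0 = c then (c0, n0 + 1) :: rest else (c, 1) :: (c0, n0) :: rest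
  | [] => [(c, 1)]

def pvRunsB (l : List Char) : List (Char × Int) :=
  (l.foldl pvRunStep []).reverse

-- delete the leftmost run of length >= k (none: no such run)
def pvRemoveFirst (k : Int) : List (Char × Int) → Option (List (Char × Int))
  | [] => none
  | (c, n) :: rest =>
    if n ≥ k then some rest
    else (pvRemoveFirst k rest).map (fun rs => (c, n) :: rs)

def pvFlat (rs : List (Char × Int)) : List Char :=
  (rs.map (fun q => List.replicate q.2.toNat q.1)).flatten

-- facts cited by pvBLoop's decreasing_by (hence placed above the port that uses them)
theorem pvFlat_cons (c : Char) (n : Int) (rs : List (Char × Int)) :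
    pvFlat ((c, n) :: rs) = List.replicate n.toNat c ++ pvFlat rs := by
  simp [pvFlat]

theorem pvRunsAux (l : List Char) : ∀ acc : List (Char × Int),
    (∀ r ∈ acc, 1 ≤ r.2) →
    List.IsChain (fun p q : Char × Int => p.1 ≠ q.1) acc →
    (∀ r ∈ l.foldl pvRunStep acc, 1 ≤ r.2) ∧
    List.IsChain (fun p q : Char × Int => p.1 ≠ q.1) (l.foldl pvRunStep acc) ∧
    pvFlat (l.foldl pvRunStep acc).reverse = pvFlat acc.reverse ++ l := by
  induction l with
  | nil => intro acc h1 h2; exact ⟨h1, h2, by simp⟩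
  | cons c l ih =>
    intro acc h1 h2
    have hstep1 : ∀ r ∈ pvRunStep acc c, 1 ≤ r.2 := by
      intro r hr
      match acc with
      | [] => simp [pvRunStep] at hr; simp [hr]
      | (c0, n0) :: rest =>
        have hn0 : 1 ≤ n0 := h1 (c0, n0) (by simp)
        by_cases hc : c0 = c
        · simp [pvRunStep, hc] at hr
          rcases hr with hr | hr
          · simp [hr]; omega
          · exact h1 r (by simp [hr])
        · simp [pvRunStep, hc] at hr
          rcases hr with hr | hr | hr
          · simp [hr]
          · simp [hr]; omega
          · exact h1 r (by simp [hr])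
    have hstep2 : List.IsChain (fun p q : Char × Int => p.1 ≠ q.1) (pvRunStep acc c) := by
      match acc with
      | [] => exact List.isChain_singleton _
      | (c0, n0) :: rest =>
        by_cases hc : c0 = c
        · simp only [pvRunStep, if_pos hc]
          match rest with
          | [] => exact List.isChain_singleton _
          | q :: t =>
            rw [List.isChain_cons_cons] at h2 ⊢
            exact h2
        · simp only [pvRunStep, if_neg hc]
          exact List.isChain_cons_cons.mpr ⟨fun h => hc h.symm, h2⟩
    have hstep3 : pvFlat (pvRunStep acc c).reverse = pvFlat acc.reverse ++ [c] := by
      match acc with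
      | [] => simp [pvRunStep, pvFlat]
      | (c0, n0) :: rest =>
        have hn0 : 1 ≤ n0 := h1 (c0, n0) (by simp)
        by_cases hc : c0 = c
        · have htn : (n0 + 1).toNat = n0.toNat + 1 := by omega
          simp [pvRunStep, hc, pvFlat, htn, List.replicate_succ']
        · simp [pvRunStep, hc, pvFlat]
    obtain ⟨g1, g2, g3⟩ := ih (pvRunStep acc c) hstep1 hstep2
    refine ⟨by simpa using g1, by simpa using g2, ?_⟩
    simp only [List.foldl_cons]
    rw [g3, hstep3]
    simp

theorem pvRunsB_pos (l : List Char) : ∀ r ∈ pvRunsB l, 1 ≤ r.2 := by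
  intro r hr
  exact (pvRunsAux l [] (by simp) List.isChain_nil).1 r (by simpa [pvRunsB] using hr)

theorem pvRunsB_flat (l : List Char) : pvFlat (pvRunsB l) = l := by
  simpa [pvRunsB] using (pvRunsAux l [] (by simp) List.isChain_nil).2.2

theorem pvRemoveFirst_some_length (k : Int) :
    ∀ rs rs' : List (Char × Int), pvRemoveFirst k rs = some rs' →
    (∀ r ∈ rs, 1 ≤ r.2) → (pvFlat rs').length < (pvFlat rs).length := by
  intro rs
  induction rs with
  | nil => intro rs' h; simp [pvRemoveFirst] at h
  | cons r rest ih =>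
    intro rs' h hpos
    obtain ⟨c, n⟩ := r
    have hn : 1 ≤ n := hpos (c, n) (by simp)
    by_cases hk : n ≥ k
    · simp [pvRemoveFirst, hk] at h
      subst h
      simp [pvFlat_cons]
      omega
    · simp [pvRemoveFirst, hk] at h
      obtain ⟨rs'', h1, h2⟩ := h
      subst h2
      have := ih rs'' h1 (fun r hr => hpos r (by simp [hr]))
      simp [pvFlat_cons]
      omega

def pvBLoop (k : Int) (l : List Char) : List Char :=
  match h : pvRemoveFirst k (pvRunsB l) with
  | none => l
  | some rs => pvBLoop k (pvFlat rs)
termination_by l.length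
decreasing_by
  exact pvRunsB_flat l ▸ pvRemoveFirst_some_length k (pvRunsB l) rs h (pvRunsB_pos l)

def removeDuplicatesGreaterOrEqualToK_alt (s : String) (k : Int) : String :=
  String.ofList (pvBLoop k s.toList)

-- ===== PRECONDITION & SPEC =====
-- Pre_ excludes only s = "", where Python A raises IndexError (dq[-1] on the empty deque).
def Pre_removeDuplicatesGreaterOrEqualToK (s : String) (k : Int) : Prop := s ≠ ""
instance (s : String) (k : Int) : Decidable (Pre_removeDuplicatesGreaterOrEqualToK s k) := by
  unfold Pre_removeDuplicatesGreaterOrEqualToK; infer_instance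
def pvWitness_removeDuplicatesGreaterOrEqualToK : String × Int := ("aabbaa", 2)

-- On the empty string A raises IndexError; B returns "".
def Raises_removeDuplicatesGreaterOrEqualToK (s : String) (k : Int) : Prop := s = ""
instance (s : String) (k : Int) : Decidable (Raises_removeDuplicatesGreaterOrEqualToK s k) := by
  unfold Raises_removeDuplicatesGreaterOrEqualToK; infer_instance
def pvRaiseWitness_removeDuplicatesGreaterOrEqualToK : String × Int := ("", 3)
def pvRaiseWitnessOut_removeDuplicatesGreaterOrEqualToK : String := ""

def Spec_removeDuplicatesGreaterOrEqualToK (s : String) (k : Int) (out : String) : Prop :=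
  out = removeDuplicatesGreaterOrEqualToK_alt s k
instance (s : String) (k : Int) (out : String) : Decidable (Spec_removeDuplicatesGreaterOrEqualToK s k out) := by
  unfold Spec_removeDuplicatesGreaterOrEqualToK; infer_instance

-- ===== CLAIM (what is proved, stated in full; the proofs are below) =====
def Claim_equal_removeDuplicatesGreaterOrEqualToK : Prop := ∀ (s : String) (k : Int), Dom_removeDuplicatesGreaterOrEqualToK s k → Pre_removeDuplicatesGreaterOrEqualToK s k → Spec_removeDuplicatesGreaterOrEqualToK s k (removeDuplicatesGreaterOrEqualToK s k)
def Claim_raises_removeDuplicatesGreaterOrEqualToK : Prop := (∀ (s : String) (k : Int), Dom_removeDuplicatesGreaterOrEqualToK s k → Raises_removeDuplicatesGreaterOrEqualToK s k → ¬ Pre_removeDuplicatesGreaterOrEqualToK s k) ∧ (Dom_removeDuplicatesGreaterOrEqualToK (pvRaiseWitness_removeDuplicatesGreaterOrEqualToK.1) (pvRaiseWitness_removeDuplicatesGreaterOrEqualToK.2) ∧ Raises_removeDuplicatesGreaterOrEqualToK (pvRaiseWitness_removeDuplicatesGreaterOrEqualToK.1) (pvRaiseWitness_removeDuplicatesGreaterOrEqualToK.2)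 ∧ removeDuplicatesGreaterOrEqualToK_alt (pvRaiseWitness_removeDuplicatesGreaterOrEqualToK.1) (pvRaiseWitness_removeDuplicatesGreaterOrEqualToK.2) = pvRaiseWitnessOut_removeDuplicatesGreaterOrEqualToK)

-- ===== LEMMAS AND PROOFS =====

theorem pvFlat_append (xs ys : List (Char × Int)) : pvFlat (xs ++ ys) = pvFlat xs ++ pvFlat ys := by
  simp [pvFlat]

theorem pvRunsB_chain (l : List Char) :
    List.IsChain (fun p q : Char × Int => p.1 ≠ q.1) (pvRunsB l) := by
  exact List.isChain_reverse.mpr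
    (((pvRunsAux l [] (by simp) List.isChain_nil).2.1).imp fun a b h => h.symm)

-- repeatedly merging the SAME char onto the top of A's deque
theorem pvMerge (k : Int) (c : Char) (acc : List (Char × Int)) :
    ∀ (j : Nat) (m : Int),
    List.foldl (pvStepA k) ((c, m) :: acc) (List.replicate j c) = (c, m + j) :: acc := by
  intro j
  induction j with
  | zero => intro m; simp
  | succ j ih =>
    intro m
    have hstep : pvStepA k ((c, m) :: acc) c = (c, m + 1) :: acc := by simp [pvStepA]
    rw [List.replicate_succ, List.foldl_cons, hstep, ih]
    simp only [List.cons.injEq, Prod.mk.injEq, and_true]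
    push_cast; ring_nf; simp

-- a fresh char on a deque whose top (if any) differs and has count < k: plain push
theorem pvPush (k : Int) (c : Char) (acc : List (Char × Int))
    (hacc : ∀ c0 n0 t, acc = (c0, n0) :: t → c0 ≠ c ∧ n0 < k) :
    pvStepA k acc c = (c, 1) :: acc := by
  match acc with
  | [] => simp [pvStepA]
  | (c0, n0) :: t =>
    obtain ⟨hne, hlt⟩ := hacc c0 n0 t rfl
    simp [pvStepA, hne, not_le.mpr hlt]

-- a whole run of n ≥ 1 equal chars lands as one deque entry
theorem pvFoldRun (k : Int) (c : Char) (n : Nat) (hn : 1 ≤ n) (acc : List (Char × Int))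
    (hacc : ∀ c0 n0 t, acc = (c0, n0) :: t → c0 ≠ c ∧ n0 < k) :
    List.foldl (pvStepA k) acc (List.replicate n c) = (c, (n : Int)) :: acc := by
  obtain ⟨j, rfl⟩ : ∃ j, n = j + 1 := ⟨n - 1, by omega⟩
  rw [List.replicate_succ, List.foldl_cons, pvPush k c acc hacc, pvMerge]
  simp only [List.cons.injEq, Prod.mk.injEq, and_true]
  push_cast; ring_nf; simp

-- folding a list all of whose runs are short: no pops, the deque is just the reversed runs
theorem pvNoPop (k : Int) :
    ∀ (rs : List (Char × Int)) (acc : List (Char × Int)),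
    (∀ r ∈ rs, 1 ≤ r.2 ∧ r.2 < k) →
    List.IsChain (fun p q : Char × Int => p.1 ≠ q.1) rs →
    (∀ c0 n0 t, acc = (c0, n0) :: t →
      n0 < k ∧ ∀ c1 n1 t1, rs = (c1, n1) :: t1 → c0 ≠ c1) →
    List.foldl (pvStepA k) acc (pvFlat rs) = rs.reverse ++ acc := by
  intro rs
  induction rs with
  | nil => intro acc _ _ _; simp [pvFlat]
  | cons r rest ih =>
    intro acc hb hch hacc
    obtain ⟨c, n⟩ := r
    obtain ⟨hn1, hnk⟩ := hb (c, n) (by simp)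
    rw [pvFlat_cons, List.foldl_append]
    have h1 : List.foldl (pvStepA k) acc (List.replicate n.toNat c) = (c, n) :: acc := by
      have := pvFoldRun k c n.toNat (by omega) acc
        (fun c0 n0 t h => ⟨((hacc c0 n0 t h).2 c n rest rfl), (hacc c0 n0 t h).1⟩)
      rwa [Int.toNat_of_nonneg (by omega)] at this
    rw [h1]
    have hch' : List.IsChain (fun p q : Char × Int => p.1 ≠ q.1) rest := by
      match rest with
      | [] => exact List.isChain_nil
      | q :: t => exact (List.isChain_cons_cons.mp hch).2
    have hjun : ∀ c1 n1 t1, rest = (c1, n1) :: t1 → c ≠ c1 := by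
      intro c1 n1 t1 h
      subst h
      exact (List.isChain_cons_cons.mp hch).1
    rw [ih ((c, n) :: acc) (fun r hr => hb r (by simp [hr])) hch'
      (fun c0 n0 t h => by
        obtain ⟨h1', h2'⟩ := List.cons.injEq _ _ _ _ ▸ h
        exact ⟨by cases h1'; exact hnk, by cases h1'; exact hjun⟩)]
    simp

-- stepping a char past a poppable top equals stepping from below it
theorem pvPopStep (k : Int) (c c1 : Char) (n : Int) (S : List (Char × Int))
    (h1 : c ≠ c1) (h2 : k ≤ n) (hS : ∀ c0 n0 t, S = (c0, n0) :: t → n0 < k) :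
    pvStepA k ((c, n) :: S) c1 = pvStepA k S c1 := by
  match S with
  | [] => simp [pvStepA, h1, h2]
  | (c0, n0) :: t =>
    have := hS c0 n0 t rfl
    simp [pvStepA, h1, h2, not_le.mpr this]

theorem pvFinish_top_ge (k : Int) (c : Char) (n : Int) (S : List (Char × Int)) (h : k ≤ n) :
    pvFinish k ((c, n) :: S) = (S.reverse.map (fun q => List.replicate q.2.toNat q.1)).flatten := by
  simp [pvFinish, h]

theorem pvFinish_ok (k : Int) (S : List (Char × Int))
    (hS : ∀ c0 n0 t, S = (c0, n0) :: t → n0 < k) :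
    pvFinish k S = (S.reverse.map (fun q => List.replicate q.2.toNat q.1)).flatten := by
  match S with
  | [] => simp [pvFinish]
  | (c0, n0) :: t =>
    have := hS c0 n0 t rfl
    simp [pvFinish, not_le.mpr this]

-- the heart: deleting one long run (short runs strictly to its left) does not change A's output
theorem pvRem (k : Int) (rsL rsR : List (Char × Int)) (c : Char) (n : Int)
    (hL : ∀ r ∈ rsL, 1 ≤ r.2 ∧ r.2 < k) (hR : ∀ r ∈ rsR, 1 ≤ r.2)
    (hch : List.IsChain (fun p q : Char × Int => p.1 ≠ q.1) (rsL ++ (c, n) :: rsR))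
    (hn : 1 ≤ n) (hk : k ≤ n) :
    pvFinish k (List.foldl (pvStepA k) [] (pvFlat (rsL ++ (c, n) :: rsR))) =
    pvFinish k (List.foldl (pvStepA k) [] (pvFlat (rsL ++ rsR))) := by
  have hchL : List.IsChain (fun p q : Char × Int => p.1 ≠ q.1) rsL := by
    rcases List.eq_nil_or_concat rsL with rfl | ⟨init, lst, rfl⟩
    · exact List.isChain_nil
    · simp only [List.concat_eq_append] at hch ⊢
      have : init ++ [lst] ++ (c, n) :: rsR = init ++ lst :: (c, n) :: rsR := by simp
      rw [this] at hch
      exact (List.isChain_append_cons_cons.mp hch).1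
  have hLtop : ∀ c0 n0 t, rsL.reverse = (c0, n0) :: t → c0 ≠ c ∧ n0 < k := by
    intro c0 n0 t h
    have hrsL : rsL = t.reverse ++ [(c0, n0)] := by
      have := congrArg List.reverse h
      simpa using this
    have hmem : (c0, n0) ∈ rsL := by rw [hrsL]; simp
    have hjun : c0 ≠ c := by
      rw [hrsL] at hch
      have : t.reverse ++ [(c0, n0)] ++ (c, n) :: rsR = t.reverse ++ (c0, n0) :: (c, n) :: rsR := by
        simp
      rw [this] at hch
      exact (List.isChain_append_cons_cons.mp hch).2.1
    exact ⟨hjun, (hL _ hmem).2⟩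
  have hfoldL : List.foldl (pvStepA k) [] (pvFlat rsL) = rsL.reverse := by
    have := pvNoPop k rsL [] hL hchL (fun c0 n0 t h => by simp at h)
    simpa using this
  have hrun : List.foldl (pvStepA k) rsL.reverse (List.replicate n.toNat c) =
      (c, n) :: rsL.reverse := by
    have := pvFoldRun k c n.toNat (by omega) rsL.reverse hLtop
    rwa [Int.toNat_of_nonneg (by omega)] at this
  have hLHS : List.foldl (pvStepA k) [] (pvFlat (rsL ++ (c, n) :: rsR)) =
      List.foldl (pvStepA k) ((c, n) :: rsL.reverse) (pvFlat rsR) := by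
    rw [pvFlat_append, pvFlat_cons, List.foldl_append, hfoldL, List.foldl_append, hrun]
  have hRHS : List.foldl (pvStepA k) [] (pvFlat (rsL ++ rsR)) =
      List.foldl (pvStepA k) rsL.reverse (pvFlat rsR) := by
    rw [pvFlat_append, List.foldl_append, hfoldL]
  rw [hLHS, hRHS]
  have hchR : List.IsChain (fun p q : Char × Int => p.1 ≠ q.1) ((c, n) :: rsR) :=
    (List.isChain_split.mp hch).2
  match rsR with
  | [] =>
    simp only [pvFlat, List.map_nil, List.flatten_nil, List.foldl_nil]
    rw [pvFinish_top_ge k c n rsL.reverse hk,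
      pvFinish_ok k rsL.reverse (fun c0 n0 t h => (hLtop c0 n0 t h).2)]
  | (c1, n1) :: rsR' =>
    have hc1 : c ≠ c1 := (List.isChain_cons_cons.mp hchR).1
    have hn1 : 1 ≤ n1 := (hR (c1, n1) (by simp))
    have hflat : pvFlat ((c1, n1) :: rsR') =
        c1 :: (List.replicate (n1.toNat - 1) c1 ++ pvFlat rsR') := by
      rw [pvFlat_cons]
      have ht : n1.toNat = (n1.toNat - 1) + 1 := by omega
      rw [ht, List.replicate_succ]
      simp
    rw [hflat, List.foldl_cons, List.foldl_cons,
      pvPopStep k c c1 n rsL.reverse hc1 hk (fun c0 n0 t h => (hLtop c0 n0 t h).2)]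

-- a string whose runs are all short is A's own output
theorem pvBaseA (k : Int) (l : List Char) (h : ∀ r ∈ pvRunsB l, r.2 < k) :
    pvFinish k (l.foldl (pvStepA k) []) = l := by
  have hb : ∀ r ∈ pvRunsB l, 1 ≤ r.2 ∧ r.2 < k := fun r hr => ⟨pvRunsB_pos l r hr, h r hr⟩
  have hfold : List.foldl (pvStepA k) [] (pvFlat (pvRunsB l)) = (pvRunsB l).reverse := by
    have := pvNoPop k (pvRunsB l) [] hb (pvRunsB_chain l) (fun c0 n0 t h' => by simp at h')
    simpa using this
  conv_lhs => rw [show l = pvFlat (pvRunsB l) from (pvRunsB_flat l).symm]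
  rw [hfold, pvFinish_ok k (pvRunsB l).reverse (fun c0 n0 t h' => by
    have : (c0, n0) ∈ (pvRunsB l).reverse := by rw [h']; simp
    exact h (c0, n0) (List.mem_reverse.mp this))]
  rw [List.reverse_reverse]
  exact pvRunsB_flat l

theorem pvRemoveFirst_none (k : Int) :
    ∀ rs : List (Char × Int), pvRemoveFirst k rs = none → ∀ r ∈ rs, r.2 < k := by
  intro rs
  induction rs with
  | nil => intro _ r hr; simp at hr
  | cons r rest ih =>
    intro h r' hr'
    obtain ⟨c, n⟩ := r
    by_cases hk : n ≥ k
    · simp [pvRemoveFirst, hk] at h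
    · simp [pvRemoveFirst, hk] at h
      rcases List.mem_cons.mp hr' with hr' | hr'
      · subst hr'; simpa using not_le.mp hk
      · exact ih h r' hr'

theorem pvRemoveFirst_some_decomp (k : Int) :
    ∀ rs rs' : List (Char × Int), pvRemoveFirst k rs = some rs' →
    ∃ rsL c n rsR, rs = rsL ++ (c, n) :: rsR ∧ rs' = rsL ++ rsR ∧
      (∀ r ∈ rsL, r.2 < k) ∧ k ≤ n := by
  intro rs
  induction rs with
  | nil => intro rs' h; simp [pvRemoveFirst] at h
  | cons r rest ih =>
    intro rs' h
    obtain ⟨c, n⟩ := r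
    by_cases hk : n ≥ k
    · simp [pvRemoveFirst, hk] at h
      exact ⟨[], c, n, rest, by simp, by simp [h], by simp, hk⟩
    · simp [pvRemoveFirst, hk] at h
      obtain ⟨rs'', h1, h2⟩ := h
      obtain ⟨rsL, c', n', rsR, e1, e2, e3, e4⟩ := ih rs'' h1
      refine ⟨(c, n) :: rsL, c', n', rsR, by simp [e1], by simp [← h2, e2], ?_, e4⟩
      intro r hr
      rcases List.mem_cons.mp hr with hr | hr
      · subst hr; simpa using not_le.mp hk
      · exact e3 r hr

theorem pvBLoop_eq_none (k : Int) (l : List Char)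
    (h : pvRemoveFirst k (pvRunsB l) = none) : pvBLoop k l = l := by
  rw [pvBLoop]
  split <;> simp_all

theorem pvBLoop_eq_some (k : Int) (l : List Char) (rs : List (Char × Int))
    (h : pvRemoveFirst k (pvRunsB l) = some rs) : pvBLoop k l = pvBLoop k (pvFlat rs) := by
  rw [pvBLoop]
  split <;> simp_all

theorem pvMainAux (k : Int) : ∀ (N : Nat) (l : List Char), l.length ≤ N →
    pvFinish k (l.foldl (pvStepA k) []) = pvBLoop k l := by
  intro N
  induction N with
  | zero =>
    intro l hl
    have : l = [] := List.eq_nil_of_length_eq_zero (by omega)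
    subst this
    rw [pvBLoop_eq_none k [] (by rfl)]
    simp [pvFinish]
  | succ N ih =>
    intro l hl
    cases h : pvRemoveFirst k (pvRunsB l) with
    | none =>
      rw [pvBLoop_eq_none k l h]
      exact pvBaseA k l (pvRemoveFirst_none k (pvRunsB l) h)
    | some rs' =>
      rw [pvBLoop_eq_some k l rs' h]
      obtain ⟨rsL, c, n, rsR, e1, e2, e3, e4⟩ := pvRemoveFirst_some_decomp k (pvRunsB l) rs' h
      have hpos : ∀ r ∈ pvRunsB l, 1 ≤ r.2 := pvRunsB_pos l
      have hL : ∀ r ∈ rsL, 1 ≤ r.2 ∧ r.2 < k := fun r hr =>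
        ⟨hpos r (by rw [e1]; simp [hr]), e3 r hr⟩
      have hR : ∀ r ∈ rsR, 1 ≤ r.2 := fun r hr => hpos r (by rw [e1]; simp [hr])
      have hn : 1 ≤ n := hpos (c, n) (by rw [e1]; simp)
      have hch : List.IsChain (fun p q : Char × Int => p.1 ≠ q.1) (rsL ++ (c, n) :: rsR) := by
        rw [← e1]; exact pvRunsB_chain l
      have hlen : (pvFlat rs').length ≤ N := by
        have := pvRemoveFirst_some_length k (pvRunsB l) rs' h hpos
        rw [pvRunsB_flat l] at this
        omega
      have hstep : pvFinish k (l.foldl (pvStepA k) []) =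
          pvFinish k ((pvFlat rs').foldl (pvStepA k) []) := by
        conv_lhs => rw [show l = pvFlat (rsL ++ (c, n) :: rsR) by rw [← e1, pvRunsB_flat]]
        rw [e2]
        exact pvRem k rsL rsR c n hL hR hch hn e4
      rw [hstep]
      exact ih (pvFlat rs') hlen

theorem pvMain (k : Int) (l : List Char) :
    pvFinish k (l.foldl (pvStepA k) []) = pvBLoop k l :=
  pvMainAux k l.length l (le_refl _)

theorem pvAltEmpty : removeDuplicatesGreaterOrEqualToK_alt "" 3 = "" := by
  have h : pvBLoop 3 ([] : List Char) = [] := pvBLoop_eq_none 3 [] (by rfl)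
  simp [removeDuplicatesGreaterOrEqualToK_alt, h]

-- ===== VERDICT (by name: the statement is the Claim_ definition above) =====
theorem removeDuplicatesGreaterOrEqualToK_spec : Claim_equal_removeDuplicatesGreaterOrEqualToK := by
  intro s k _ _
  show _ = _
  simp [removeDuplicatesGreaterOrEqualToK, removeDuplicatesGreaterOrEqualToK_alt, pvMain]

theorem removeDuplicatesGreaterOrEqualToK_raises : Claim_raises_removeDuplicatesGreaterOrEqualToK := by
  unfold Claim_raises_removeDuplicatesGreaterOrEqualToK
  refine ⟨fun s k _ h => by
    simp [Raises_removeDuplicatesGreaterOrEqualToK] at h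
    simp [Pre_removeDuplicatesGreaterOrEqualToK, h], ⟨by decide, by decide, pvAltEmpty⟩⟩

-- self-check: the crash-fix witness value, read off the raises theorem
theorem pvRaiseWitnessValue_ok : removeDuplicatesGreaterOrEqualToK_alt "" 3 = "" :=
  removeDuplicatesGreaterOrEqualToK_raises.2.2.2
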